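-- pv_equiv track=rewrite | github.com/rschaeff/dali_rust | wolf/wolf.py | compressblocks
-- ===== SOURCE A (Python) =====
-- def compressblocks(nblock, l1, r1, l2, r2):
--     """
--     Merge consecutive single-residue alignment blocks.
--
--     Exact translation of comparemodules.f compressblocks().
--
--     Args:
--         nblock: number of blocks
--         l1, r1, l2, r2: lists of block boundaries (1-based, modified in-place)
--
--     Returns:
--         new_nblock: compressed block count
--     """
--     if nblock == 0:
--         return 0
--
--     i = 0  # read pointer (0-based)
--     n = 0  # write pointer (0-based)
--
--     while i < nblock:
--         # Copy current block
--         if n < len(l1):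
--             l1[n] = l1[i]
--             l2[n] = l2[i]
--             r1[n] = r1[i]
--             r2[n] = r2[i]
--         else:
--             l1.append(l1[i])
--             l2.append(l2[i])
--             r1.append(r1[i])
--             r2.append(r2[i])
--
--         if i < nblock - 1:
--             # Try to merge consecutive single-residue blocks
--             while (l1[i] == r1[i] and l2[i] == r2[i] and
--                    l1[i + 1] == r1[i] + 1 and l2[i + 1] == r2[i] + 1):
--                 if i + 1 >= nblock - 1:
--                     break
--                 i += 1
--             r1[n] = r1[i]
--             r2[n] = r2[i]
--
--         n += 1
--         i += 1
--
--     return n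
-- ===== SOURCE B (Python) =====
-- def compressblocks(nblock, l1, r1, l2, r2):
--     """Return the compressed block count directly: every junction i where the
--     chain condition fails is a run boundary, and the scan always stops before
--     the last block, so for nblock >= 2 the answer is 2 plus the number of
--     non-chainable junctions among the first nblock-2.  (Pure: unlike A, this
--     does not rewrite l1/r1/l2/r2 in place; only the return value is claimed.)"""
--     if nblock <= 0:
--         return 0
--     if nblock == 1:
--         return 1
--     return 2 + sum(1 for i in range(nblock - 2)
--                    if not (l1[i] == r1[i] and l2[i] == r2[i]
--                            and l1[i + 1] == r1[i] + 1
--                            and l2[i + 1] == r2[i] + 1))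
-- ===== Notes on version B (the rewrite author's own statement) =====
-- stated objective: simpler
-- what changed: Replaces A's interleaved two-pointer read/write compaction of the four lists by a direct count: for nblock>=2 the result is 2 plus the number of junctions among the first nblock-2 that fail the single-residue chain test, so B never rewrites the lists (return value only; A mutates its list arguments in place, B does not).
import Mathlib
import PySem

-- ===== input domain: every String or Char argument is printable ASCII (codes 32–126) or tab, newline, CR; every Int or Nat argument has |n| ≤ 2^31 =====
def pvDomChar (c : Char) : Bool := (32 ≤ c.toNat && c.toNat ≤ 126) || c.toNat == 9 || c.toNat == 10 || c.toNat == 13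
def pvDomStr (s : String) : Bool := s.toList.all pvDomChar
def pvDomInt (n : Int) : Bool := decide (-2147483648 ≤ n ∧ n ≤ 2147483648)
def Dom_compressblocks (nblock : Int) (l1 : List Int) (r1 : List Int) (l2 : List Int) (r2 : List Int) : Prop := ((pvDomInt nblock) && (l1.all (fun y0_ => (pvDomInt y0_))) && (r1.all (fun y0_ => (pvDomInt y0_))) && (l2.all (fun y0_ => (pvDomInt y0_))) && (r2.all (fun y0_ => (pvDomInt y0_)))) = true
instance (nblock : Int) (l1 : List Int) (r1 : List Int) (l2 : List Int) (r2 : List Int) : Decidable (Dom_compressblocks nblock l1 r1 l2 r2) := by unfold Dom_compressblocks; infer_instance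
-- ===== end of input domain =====

-- B replaces A's interleaved two-pointer in-place compaction by a direct count (2 + number of
-- non-chainable junctions); objective: simpler.  A mutates l1/r1/l2/r2 in place and B does not:
-- the equivalence claimed here is about the RETURN value only.

-- the single-residue chain test, appearing verbatim as A's inner `while` condition and as B's
-- comprehension condition (shared helper of both ports)
def mcond (l1 : List Int) (r1 : List Int) (l2 : List Int) (r2 : List Int) (i : Int) : Bool :=
  PySem.List.pyGetD l1 i 0 == PySem.List.pyGetD r1 i 0 &&
  PySem.List.pyGetD l2 i 0 == PySem.List.pyGetD r2 i 0 &&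
  PySem.List.pyGetD l1 (i + 1) 0 == PySem.List.pyGetD r1 i 0 + 1 &&
  PySem.List.pyGetD l2 (i + 1) 0 == PySem.List.pyGetD r2 i 0 + 1

-- ===== PORT A =====
-- A's inner `while` loop: advance i while the chain test holds, breaking before the last block
def innerA (nblock : Int) (l1 : List Int) (r1 : List Int) (l2 : List Int) (r2 : List Int) (i : Int) : Int :=
  if mcond l1 r1 l2 r2 i then
    if nblock - 1 ≤ i + 1 then i
    else innerA nblock l1 r1 l2 r2 (i + 1)
  else i
termination_by (nblock - 1 - i).toNat
decreasing_by omega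

-- A's outer `while i < nblock` loop, threading the four mutated lists; the Nat fuel
-- (nblock.toNat at the call site, one unit per iteration, i grows by at least 1 each time)
-- is only a totality guard: the loop itself always stops via i ≥ nblock
def outerA (fuel : Nat) (nblock : Int) (l1 : List Int) (r1 : List Int) (l2 : List Int) (r2 : List Int) (i n : Int) : Int :=
  match fuel with
  | 0 => n
  | fuel + 1 =>
    if i < nblock then
      let l1' := if n < (l1.length : Int) then PySem.List.pySetD l1 n (PySem.List.pyGetD l1 i 0) else l1 ++ [PySem.List.pyGetD l1 i 0]
      let l2' := if n < (l1.length : Int) then PySem.List.pySetD l2 n (PySem.List.pyGetD l2 i 0) else l2 ++ [PySem.List.pyGetD l2 i 0]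
      let r1' := if n < (l1.length : Int) then PySem.List.pySetD r1 n (PySem.List.pyGetD r1 i 0) else r1 ++ [PySem.List.pyGetD r1 i 0]
      let r2' := if n < (l1.length : Int) then PySem.List.pySetD r2 n (PySem.List.pyGetD r2 i 0) else r2 ++ [PySem.List.pyGetD r2 i 0]
      if i < nblock - 1 then
        let j := innerA nblock l1' r1' l2' r2' i
        outerA fuel nblock l1' (PySem.List.pySetD r1' n (PySem.List.pyGetD r1' j 0)) l2'
               (PySem.List.pySetD r2' n (PySem.List.pyGetD r2' j 0)) (j + 1) (n + 1)
      else
        outerA fuel nblock l1' r1' l2' r2' (i + 1) (n + 1)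
    else n

def compressblocks (nblock : Int) (l1 : List Int) (r1 : List Int) (l2 : List Int) (r2 : List Int) : Int :=
  if nblock == 0 then 0
  else outerA nblock.toNat nblock l1 r1 l2 r2 0 0

-- ===== PORT B =====
def compressblocks_alt (nblock : Int) (l1 : List Int) (r1 : List Int) (l2 : List Int) (r2 : List Int) : Int :=
  if nblock ≤ 0 then 0
  else if nblock == 1 then 1
  else 2 + (PySem.List.pyRange 0 (nblock - 2) 1).foldl
      (fun acc i => if !mcond l1 r1 l2 r2 i then acc + 1 else acc) 0

-- ===== PRECONDITION & SPEC =====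
-- Pre_ excludes exactly the inputs where A raises IndexError: nblock larger than some list's length
def Pre_compressblocks (nblock : Int) (l1 : List Int) (r1 : List Int) (l2 : List Int) (r2 : List Int) : Prop :=
  nblock ≤ (l1.length : Int) ∧ nblock ≤ (r1.length : Int) ∧ nblock ≤ (l2.length : Int) ∧ nblock ≤ (r2.length : Int)
instance (nblock : Int) (l1 : List Int) (r1 : List Int) (l2 : List Int) (r2 : List Int) : Decidable (Pre_compressblocks nblock l1 r1 l2 r2) := by unfold Pre_compressblocks; infer_instance

def pvWitness_compressblocks : Int × List Int × List Int × List Int × List Int :=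
  (3, [1, 2, 5], [1, 2, 6], [10, 11, 20], [10, 11, 21])

def Spec_compressblocks (nblock : Int) (l1 : List Int) (r1 : List Int) (l2 : List Int) (r2 : List Int) (out : Int) : Prop := out = compressblocks_alt nblock l1 r1 l2 r2
instance (nblock : Int) (l1 : List Int) (r1 : List Int) (l2 : List Int) (r2 : List Int) (out : Int) : Decidable (Spec_compressblocks nblock l1 r1 l2 r2 out) := by unfold Spec_compressblocks; infer_instance

-- ===== CLAIM (what is proved, stated in full; the proofs are below) =====
def Claim_equal_compressblocks : Prop := ∀ (nblock : Int) (l1 : List Int) (r1 : List Int) (l2 : List Int) (r2 : List Int), Dom_compressblocks nblock l1 r1 l2 r2 → Pre_compressblocks nblock l1 r1 l2 r2 → Spec_compressblocks nblock l1 r1 l2 r2 (compressblocks nblock l1 r1 l2 r2)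

-- ===== LEMMAS AND PROOFS =====

-- agreement of a mutated list with the original on positions i … nblock-1
def Ag (L M : List Int) (i nb : Int) : Prop :=
  ∀ j : Int, i ≤ j → j < nb → PySem.List.pyGetD L j 0 = PySem.List.pyGetD M j 0

theorem Ag_refl (L : List Int) (i nb : Int) : Ag L L i nb := fun _ _ _ => rfl

theorem Ag_mono (L M : List Int) (i i' nb : Int) (h : i ≤ i') (hA : Ag L M i nb) : Ag L M i' nb :=
  fun j h1 h2 => hA j (le_trans h h1) h2

-- writing below the agreement window preserves it
theorem Ag_set_lt (L M : List Int) (i nb n v : Int) (h0 : 0 ≤ n) (hni : n < i)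
    (h : Ag L M i nb) : Ag (PySem.List.pySetD L n v) M i nb := by
  intro j hij hjn
  have h0j : 0 ≤ j := by omega
  rw [PySem.List.pySetD_of_nonneg L v h0]
  have hj : j = ((j.toNat : Int)) := (Int.toNat_of_nonneg h0j).symm
  rw [hj, PySem.List.pyGetD_natCast]
  rw [List.getD, List.getElem?_set_ne (by omega : n.toNat ≠ j.toNat)]
  have := h j hij hjn
  rw [hj, PySem.List.pyGetD_natCast, List.getD] at this
  exact this

-- xs[n] = xs[n] is the identity
theorem pySetD_self (L : List Int) (n : Int) (h0 : 0 ≤ n) :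
    PySem.List.pySetD L n (PySem.List.pyGetD L n 0) = L := by
  rw [PySem.List.pySetD_of_nonneg L _ h0]
  by_cases h : n.toNat < L.length
  · rw [PySem.List.pyGetD_eq_getElem L 0 h0 (by omega)]
    exact List.set_getElem_self h
  · exact List.set_eq_of_length_le (by omega)

-- the copy step l[n] = l[i] (n ≤ i) preserves agreement from i
theorem Ag_copy (L M : List Int) (i nb n : Int) (h0 : 0 ≤ n) (hni : n ≤ i)
    (h : Ag L M i nb) : Ag (PySem.List.pySetD L n (PySem.List.pyGetD L i 0)) M i nb := by
  rcases eq_or_lt_of_le hni with rfl | hlt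
  · rw [pySetD_self L n h0]; exact h
  · exact Ag_set_lt L M i nb n _ h0 hlt h

theorem mcond_congr (L1 R1 L2 R2 l1 r1 l2 r2 : List Int) (i nb : Int) (hplus : i + 1 < nb)
    (a1 : Ag L1 l1 i nb) (a2 : Ag R1 r1 i nb) (a3 : Ag L2 l2 i nb) (a4 : Ag R2 r2 i nb) :
    mcond L1 R1 L2 R2 i = mcond l1 r1 l2 r2 i := by
  have e1 := a1 i le_rfl (by omega)
  have e1' := a1 (i + 1) (by omega) hplus
  have e2 := a2 i le_rfl (by omega)
  have e3 := a3 i le_rfl (by omega)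
  have e3' := a3 (i + 1) (by omega) hplus
  have e4 := a4 i le_rfl (by omega)
  simp [mcond, e1, e1', e2, e3, e3', e4]

-- innerA only reads positions i … nblock-1, so it is insensitive to the mutation
theorem innerA_congr (nb : Int) (L1 R1 L2 R2 l1 r1 l2 r2 : List Int) :
    ∀ (fuel : Nat) (i : Int), (nb - 1 - i).toNat ≤ fuel → i < nb - 1 →
    Ag L1 l1 i nb → Ag R1 r1 i nb → Ag L2 l2 i nb → Ag R2 r2 i nb →
    innerA nb L1 R1 L2 R2 i = innerA nb l1 r1 l2 r2 i := by
  intro fuel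
  induction fuel with
  | zero => intro i hf hi _ _ _ _; omega
  | succ f ih =>
    intro i hf hi a1 a2 a3 a4
    conv_lhs => rw [innerA]
    conv_rhs => rw [innerA]
    rw [mcond_congr L1 R1 L2 R2 l1 r1 l2 r2 i nb (by omega) a1 a2 a3 a4]
    by_cases hc : mcond l1 r1 l2 r2 i
    · rw [if_pos hc, if_pos hc]
      by_cases hs : nb - 1 ≤ i + 1
      · rw [if_pos hs, if_pos hs]
      · rw [if_neg hs, if_neg hs]
        exact ih (i + 1) (by omega) (by omega)
          (Ag_mono _ _ i (i + 1) nb (by omega) a1) (Ag_mono _ _ i (i + 1) nb (by omega) a2)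
          (Ag_mono _ _ i (i + 1) nb (by omega) a3) (Ag_mono _ _ i (i + 1) nb (by omega) a4)
    · rw [if_neg hc, if_neg hc]

theorem innerA_ge (nblock : Int) (l1 r1 l2 r2 : List Int) (i : Int) :
    i ≤ innerA nblock l1 r1 l2 r2 i := by
  fun_induction innerA <;> omega

theorem innerA_le (nb : Int) (l1 r1 l2 r2 : List Int) (i : Int) :
    i ≤ nb - 2 → innerA nb l1 r1 l2 r2 i ≤ nb - 2 := by
  fun_induction innerA with
  | case1 => intro h; omega
  | case2 => intro h; rename_i ih; exact ih (by omega)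
  | case3 => intro h; omega

-- run-boundary count from position i: every j with nb-2 ≤ j or a failing chain test ends a block
def countFrom (nb : Int) (l1 r1 l2 r2 : List Int) (i : Int) : Int :=
  if i < nb then
    (if nb - 2 ≤ i ∨ mcond l1 r1 l2 r2 i = false then 1 else 0) + countFrom nb l1 r1 l2 r2 (i + 1)
  else 0
termination_by (nb - i).toNat
decreasing_by omega

-- one merged run consumes exactly one boundary
theorem innerA_count (nb : Int) (l1 r1 l2 r2 : List Int) (i : Int) :
    i ≤ nb - 2 → countFrom nb l1 r1 l2 r2 i = 1 + countFrom nb l1 r1 l2 r2 (innerA nb l1 r1 l2 r2 i + 1) := by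
  fun_induction innerA with
  | case1 =>
    intro h
    rw [countFrom, if_pos (by omega), if_pos (Or.inl (by omega))]
  | case2 =>
    intro h
    rename_i ih
    rename_i hc hs
    rw [countFrom, if_pos (by omega), if_neg (by simp [hc]; omega)]
    rw [ih (by omega)]
    ring
  | case3 =>
    intro h
    rename_i hc
    rw [countFrom, if_pos (by omega), if_pos (Or.inr (by simpa using hc))]

-- main invariant: outerA returns n plus the number of run boundaries from i, computed on the
-- ORIGINAL lists (the mutation never touches positions ≥ i)
theorem outer_count (nb : Int) (l1 r1 l2 r2 : List Int)
    (hb1 : nb ≤ (l1.length : Int)) (_hb2 : nb ≤ (r1.length : Int))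
    (_hb3 : nb ≤ (l2.length : Int)) (_hb4 : nb ≤ (r2.length : Int)) :
    ∀ (fuel : Nat) (L1 R1 L2 R2 : List Int) (i n : Int),
      (nb - i).toNat ≤ fuel → 0 ≤ n → n ≤ i →
      L1.length = l1.length → R1.length = r1.length → L2.length = l2.length → R2.length = r2.length →
      Ag L1 l1 i nb → Ag R1 r1 i nb → Ag L2 l2 i nb → Ag R2 r2 i nb →
      outerA fuel nb L1 R1 L2 R2 i n = n + countFrom nb l1 r1 l2 r2 i := by
  intro fuel
  induction fuel with
  | zero =>
    intro L1 R1 L2 R2 i n hf _ _ _ _ _ _ _ _ _ _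
    rw [countFrom, if_neg (by omega), outerA]
    ring
  | succ f ih =>
    intro L1 R1 L2 R2 i n hf hn0 hni hL1 hR1 hL2 hR2 a1 a2 a3 a4
    by_cases hi : i < nb
    · rw [outerA, if_pos hi]
      have hlen : n < (L1.length : Int) := by rw [hL1]; omega
      simp only [if_pos hlen]
      have a1' : Ag (PySem.List.pySetD L1 n (PySem.List.pyGetD L1 i 0)) l1 i nb := Ag_copy _ _ _ _ _ hn0 hni a1
      have a2' : Ag (PySem.List.pySetD R1 n (PySem.List.pyGetD R1 i 0)) r1 i nb := Ag_copy _ _ _ _ _ hn0 hni a2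
      have a3' : Ag (PySem.List.pySetD L2 n (PySem.List.pyGetD L2 i 0)) l2 i nb := Ag_copy _ _ _ _ _ hn0 hni a3
      have a4' : Ag (PySem.List.pySetD R2 n (PySem.List.pyGetD R2 i 0)) r2 i nb := Ag_copy _ _ _ _ _ hn0 hni a4
      by_cases hbr : i < nb - 1
      · rw [if_pos hbr]
        have hcong : innerA nb (PySem.List.pySetD L1 n (PySem.List.pyGetD L1 i 0))
            (PySem.List.pySetD R1 n (PySem.List.pyGetD R1 i 0))
            (PySem.List.pySetD L2 n (PySem.List.pyGetD L2 i 0))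
            (PySem.List.pySetD R2 n (PySem.List.pyGetD R2 i 0)) i
            = innerA nb l1 r1 l2 r2 i :=
          innerA_congr nb _ _ _ _ l1 r1 l2 r2 (nb - 1 - i).toNat i le_rfl hbr a1' a2' a3' a4'
        rw [hcong]
        have hge : i ≤ innerA nb l1 r1 l2 r2 i := innerA_ge nb l1 r1 l2 r2 i
        have hle : innerA nb l1 r1 l2 r2 i ≤ nb - 2 := innerA_le nb l1 r1 l2 r2 i (by omega)

        rw [ih _ _ _ _ (innerA nb l1 r1 l2 r2 i + 1) (n + 1) (by omega) (by omega) (by omega)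
          (by simp [PySem.List.length_pySetD, hL1]) (by simp [PySem.List.length_pySetD, hR1])
          (by simp [PySem.List.length_pySetD, hL2]) (by simp [PySem.List.length_pySetD, hR2])
          (Ag_mono _ _ i _ nb (by omega) a1')
          (Ag_set_lt _ _ _ _ _ _ hn0 (by omega) (Ag_mono _ _ i _ nb (by omega) a2'))
          (Ag_mono _ _ i _ nb (by omega) a3')
          (Ag_set_lt _ _ _ _ _ _ hn0 (by omega) (Ag_mono _ _ i _ nb (by omega) a4'))]
        rw [innerA_count nb l1 r1 l2 r2 i (by omega)]
        ring
      · rw [if_neg hbr]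
        rw [ih _ _ _ _ (i + 1) (n + 1) (by omega) (by omega) (by omega)
          (by simp [PySem.List.length_pySetD, hL1]) (by simp [PySem.List.length_pySetD, hR1])
          (by simp [PySem.List.length_pySetD, hL2]) (by simp [PySem.List.length_pySetD, hR2])
          (Ag_mono _ _ i (i + 1) nb (by omega) a1') (Ag_mono _ _ i (i + 1) nb (by omega) a2')
          (Ag_mono _ _ i (i + 1) nb (by omega) a3') (Ag_mono _ _ i (i + 1) nb (by omega) a4')]
        conv_rhs => rw [countFrom]
        rw [if_pos hi, if_pos (Or.inl (by omega))]
        ring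
    · rw [outerA, if_neg hi]
      conv_rhs => rw [countFrom]
      rw [if_neg hi]
      ring

-- countFrom in closed form: 2 boundaries at the end plus one per failing junction
theorem countFrom_closed (nb : Int) (l1 r1 l2 r2 : List Int) :
    ∀ (fuel : Nat) (i : Int), (nb - 2 - i).toNat ≤ fuel → 0 ≤ i → i ≤ nb - 2 →
    countFrom nb l1 r1 l2 r2 i =
      2 + (((PySem.List.pyRange i (nb - 2) 1).countP (fun k => !mcond l1 r1 l2 r2 k) : Nat) : Int) := by
  intro fuel
  induction fuel with
  | zero =>
    intro i hf h0 h2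
    have he : i = nb - 2 := by omega
    subst he
    rw [countFrom, if_pos (by omega), if_pos (Or.inl le_rfl)]
    rw [countFrom, if_pos (by omega), if_pos (Or.inl (by omega))]
    rw [countFrom, if_neg (by omega)]
    simp [PySem.List.pyRange_one_eq_nil (by omega : nb - 2 ≤ nb - 2)]
  | succ f ih =>
    intro i hf h0 h2
    rcases eq_or_lt_of_le h2 with he | hlt
    · subst he
      rw [countFrom, if_pos (by omega), if_pos (Or.inl le_rfl)]
      rw [countFrom, if_pos (by omega), if_pos (Or.inl (by omega))]
      rw [countFrom, if_neg (by omega)]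
      simp [PySem.List.pyRange_one_eq_nil (by omega : nb - 2 ≤ nb - 2)]
    · rw [countFrom, if_pos (by omega)]
      rw [PySem.List.pyRange_one_cons (by omega : i < nb - 2)]
      rw [List.countP_cons, ih (i + 1) (by omega) (by omega) (by omega)]
      by_cases hc : mcond l1 r1 l2 r2 i
      · rw [if_neg (by simp [hc]; omega)]
        simp [hc]
      · rw [if_pos (Or.inr (by simpa using hc))]
        simp [hc]
        ring

-- ===== VERDICT (by name: the statement is the Claim_ definition above) =====
theorem compressblocks_spec : Claim_equal_compressblocks := by
  intro nblock l1 r1 l2 r2 _ hpre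
  obtain ⟨h1, h2, h3, h4⟩ := hpre
  unfold Spec_compressblocks
  by_cases h0 : nblock ≤ 0
  · have hA : compressblocks nblock l1 r1 l2 r2 = 0 := by
      unfold compressblocks
      by_cases hz : nblock = 0
      · simp [hz]
      · rw [if_neg (by simpa using hz), show nblock.toNat = 0 from by omega, outerA]
    rw [hA]
    unfold compressblocks_alt
    rw [if_pos h0]
  · have h0' : 0 < nblock := by omega
    have hA : compressblocks nblock l1 r1 l2 r2 = 0 + countFrom nblock l1 r1 l2 r2 0 := by
      unfold compressblocks
      rw [if_neg (by simp; omega)]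
      exact outer_count nblock l1 r1 l2 r2 h1 h2 h3 h4 nblock.toNat l1 r1 l2 r2 0 0
        (by omega) le_rfl le_rfl rfl rfl rfl rfl
        (Ag_refl _ _ _) (Ag_refl _ _ _) (Ag_refl _ _ _) (Ag_refl _ _ _)
    rw [hA]
    unfold compressblocks_alt
    rw [if_neg (by omega)]
    by_cases hone : nblock = 1
    · subst hone
      rw [if_pos (by decide)]
      rw [countFrom, if_pos (by omega), if_pos (Or.inl (by omega)), countFrom, if_neg (by omega)]
      norm_num
    · rw [if_neg (by simpa using hone)]
      rw [countFrom_closed nblock l1 r1 l2 r2 (nblock - 2).toNat 0 (by omega) le_rfl (by omega)]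
      rw [PySem.List.foldl_if_add_one]
      ring
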